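-- pv_equiv track=rewrite | github.com/louAphasia/ExCheckPy | __PyWSB/zadania_powt.py | powtarzalne
-- ===== SOURCE A (Python) =====
-- def powtarzalne(lista):
--   if lista==[]:
--     return []
--   listw=[]
--   s=set()
--   for i in lista:
--       if i in s:
--           listw.append(True)
--       else:
--           listw.append(False)
--       s.add(i)
--   return listw
-- ===== SOURCE B (Python) =====
-- def powtarzalne(lista):
--     first = {}
--     for i, x in enumerate(lista):
--         first.setdefault(x, i)
--     return [first[x] < i for i, x in enumerate(lista)]
-- ===== Notes on version B (the rewrite author's own statement) =====
-- stated objective: alternative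
-- what changed: A streams once with a growing membership set appending a flag per element; B first builds a dict of first-occurrence indices via setdefault over enumerate, then marks each position True exactly when it lies past its element's first occurrence.
import Mathlib
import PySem

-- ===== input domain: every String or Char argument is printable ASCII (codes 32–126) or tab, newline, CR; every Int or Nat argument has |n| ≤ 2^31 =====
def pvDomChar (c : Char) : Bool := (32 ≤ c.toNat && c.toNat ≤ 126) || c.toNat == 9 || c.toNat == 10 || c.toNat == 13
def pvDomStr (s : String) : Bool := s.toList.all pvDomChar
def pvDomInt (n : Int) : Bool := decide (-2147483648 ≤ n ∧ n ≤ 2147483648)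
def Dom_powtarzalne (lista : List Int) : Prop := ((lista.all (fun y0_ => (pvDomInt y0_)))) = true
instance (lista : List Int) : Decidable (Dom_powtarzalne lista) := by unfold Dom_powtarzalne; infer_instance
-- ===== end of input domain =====

-- B builds a dict of first-occurrence indices in one pass, then marks each position True
-- exactly when it lies past its element's first occurrence (alternative decomposition, same cost).

-- ===== PORT A =====
def powtarzalne (lista : List Int) : List Bool :=
  if lista = [] then []
  else
    (lista.foldl
      (fun (acc : List Bool × PySem.Set Int) i =>
        ((if PySem.Set.contains acc.2 i then acc.1 ++ [true] else acc.1 ++ [false]),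
         PySem.Set.add acc.2 i))
      ([], PySem.Set.empty)).1

-- ===== PORT B =====
-- `first[x]` in the comprehension never raises (every x of lista is a key of `first`);
-- it is ported as `(first.get? x).getD 0`.
def powtarzalne_alt (lista : List Int) : List Bool :=
  let first := (PySem.List.enumerate lista).foldl
    (fun (d : PySem.Dict Int Int) p => d.setdefault p.2 p.1) PySem.Dict.empty
  (PySem.List.enumerate lista).map (fun p => decide ((first.get? p.2).getD 0 < p.1))

-- ===== PRECONDITION & SPEC =====
def Spec_powtarzalne (lista : List Int) (out : List Bool) : Prop := out = powtarzalne_alt lista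
instance (lista : List Int) (out : List Bool) : Decidable (Spec_powtarzalne lista out) := by unfold Spec_powtarzalne; infer_instance

-- ===== CLAIM (what is proved, stated in full; the proofs are below) =====
def Claim_equal_powtarzalne : Prop := ∀ (lista : List Int), Dom_powtarzalne lista → Spec_powtarzalne lista (powtarzalne lista)

-- ===== LEMMAS AND PROOFS =====

/-- Canonical form: flag of each element = "already present in the list of elements before it". -/
def specAux : List Int → List Int → List Bool
  | _, [] => []
  | seen, x :: xs => (decide (x ∈ seen)) :: specAux (seen ++ [x]) xs

theorem length_specAux (l seen : List Int) : (specAux seen l).length = l.length := by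
  induction l generalizing seen with
  | nil => rfl
  | cons x xs ih => simp [specAux, ih]

theorem getElem_specAux (l : List Int) (seen : List Int) (k : Nat) (hk : k < l.length) :
    (specAux seen l)[k]'(by rw [length_specAux]; exact hk)
      = decide (l[k] ∈ seen ++ l.take k) := by
  induction l generalizing seen k with
  | nil => exact absurd hk (by simp)
  | cons x xs ih =>
    cases k with
    | zero => simp [specAux]
    | succ k =>
      simp only [specAux, List.getElem_cons_succ, List.take_succ_cons]
      rw [ih (seen ++ [x]) k (by simpa using hk)]
      simp [List.append_assoc]

theorem add_ofList (seen : List Int) (i : Int) :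
    PySem.Set.add (PySem.Set.ofList seen) i = PySem.Set.ofList (seen ++ [i]) := by
  simp [PySem.Set.ofList_eq_foldl, List.foldl_append]

theorem A_loop (l : List Int) (seen : List Int) (acc : List Bool) :
    (l.foldl
      (fun (acc : List Bool × PySem.Set Int) i =>
        ((if PySem.Set.contains acc.2 i then acc.1 ++ [true] else acc.1 ++ [false]),
         PySem.Set.add acc.2 i))
      (acc, PySem.Set.ofList seen)).1 = acc ++ specAux seen l := by
  induction l generalizing seen acc with
  | nil => simp [specAux]
  | cons x xs ih =>
    simp only [List.foldl_cons, specAux]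
    rw [add_ofList]
    by_cases hx : x ∈ seen
    · rw [if_pos (by simp [hx])]
      rw [ih (seen ++ [x]) (acc ++ [true])]
      simp [hx]
    · rw [if_neg (by simp [hx])]
      rw [ih (seen ++ [x]) (acc ++ [false])]
      simp [hx]

theorem A_eq_specAux (l : List Int) : powtarzalne l = specAux [] l := by
  unfold powtarzalne
  by_cases h : l = []
  · simp [h, specAux]
  · rw [if_neg h]
    have := A_loop l [] []
    simpa [PySem.Set.ofList] using this

/-- first-occurrence index of x in l, counting positions from s (none if absent). -/
def firstIdx : List Int → Int → Int → Option Int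
  | [], _, _ => none
  | y :: ys, s, x => if y = x then some s else firstIdx ys (s + 1) x

theorem B_dict (l : List Int) (s : Int) (d : PySem.Dict Int Int) (x : Int) :
    (((PySem.List.enumerate l s).foldl
        (fun (d : PySem.Dict Int Int) p => d.setdefault p.2 p.1) d).get? x)
      = (d.get? x).or (firstIdx l s x) := by
  induction l generalizing s d with
  | nil => simp [PySem.List.enumerate_nil, firstIdx]
  | cons y ys ih =>
    rw [PySem.List.enumerate_cons]
    simp only [List.foldl_cons, firstIdx]
    rw [ih]
    by_cases hxy : y = x
    · subst hxy
      rw [PySem.Dict.get?_setdefault_self]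
      cases h : d.get? y <;> simp
    · have hne : x ≠ y := fun h => hxy h.symm
      rw [PySem.Dict.get?_setdefault_of_ne d s hne]
      simp [hxy]

theorem firstIdx_lt (l : List Int) (k : Nat) (hk : k < l.length) (s : Int) :
    ((firstIdx l s l[k]).getD 0 < s + k) ↔ l[k] ∈ l.take k := by
  induction l generalizing k s with
  | nil => exact absurd hk (by simp)
  | cons y ys ih =>
    cases k with
    | zero =>
      simp [firstIdx]
    | succ k =>
      have hk' : k < ys.length := by simpa using hk
      simp only [List.getElem_cons_succ, List.take_succ_cons, firstIdx]
      by_cases hxy : y = ys[k]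
      · rw [if_pos hxy]
        simp only [Option.getD_some]
        constructor
        · intro _
          exact hxy ▸ List.mem_cons_self
        · intro _
          push_cast
          omega
      · rw [if_neg hxy]
        have := ih k hk' (s + 1)
        constructor
        · intro h
          exact List.mem_cons_of_mem _ (this.mp (by push_cast at h ⊢; omega))
        · intro h
          have hm : ys[k] ∈ ys.take k := by
            rcases List.mem_cons.mp h with h' | h'
            · exact absurd h'.symm hxy
            · exact h'
          have := this.mpr hm
          push_cast at this ⊢; omega

theorem B_eq_specAux (l : List Int) : powtarzalne_alt l = specAux [] l := by
  unfold powtarzalne_alt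
  apply List.ext_getElem
  · simp [PySem.List.length_enumerate, length_specAux]
  · intro k h1 h2
    rw [List.getElem_map, PySem.List.getElem_enumerate]
    have hk : k < l.length := by simpa [PySem.List.length_enumerate] using h1
    rw [getElem_specAux l [] k hk]
    rw [B_dict]
    simp only [PySem.Dict.get?_empty, Option.or, List.nil_append]
    have := firstIdx_lt l k hk 0
    simp only [zero_add] at this ⊢
    by_cases hmem : l[k] ∈ l.take k
    · simp [this.mpr hmem, hmem]
    · simp only [hmem, decide_false]
      simp only [decide_eq_false_iff_not]
      intro hlt
      exact hmem (this.mp hlt)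

-- ===== VERDICT (by name: the statement is the Claim_ definition above) =====
theorem powtarzalne_spec : Claim_equal_powtarzalne := by
  intro lista _
  unfold Spec_powtarzalne
  rw [A_eq_specAux, B_eq_specAux]
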